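-- pv_equiv track=rewrite | github.com/NAMEDgun/Python-Algorithm | 9th_Algorithm_Study/MOVE_110/solution(stack).py | solution
-- ===== SOURCE A (Python) =====
-- def solution(s):
--     def remove_110(string):
--         stack = []
--         count_110 = 0
--
--         # 문자열 내에서 "110" 패턴을 탐색하고 제거
--         for char in string:
--             if len(stack) >= 2 and stack[-1] == '1' and stack[-2] == '1' and char == '0':
--                 count_110 += 1
--                 stack.pop()
--                 stack.pop()
--             else:
--                 stack.append(char)
--
--         # 남은 문자열에서 연속된 '1' 개수 계산
--         count_1 = 0
--         for char in stack[::-1]: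
--             if char == '0':
--                 break
--             else:
--                 count_1 += 1
--
--         # 최종 결과 문자열 생성
--         result = ''.join(stack[:len(stack) - count_1]) + '110' * count_110 + '1' * count_1
--         return result
--
--     answer = []
--
--     for string in s:
--         modified_string = remove_110(string)
--         answer.append(modified_string)
--
--     return answer
-- ===== SOURCE B (Python) =====
-- def solution(s):
--     # Rewriting approach: repeatedly splice out the leftmost "110" occurrence
--     # until none remains (string rewriting to its normal form; the system has
--     # no overlaps, so this matches A's stack elimination), recover the removal
--     # count from the length difference, and reinsert the removed patterns
--     # before the trailing run of non-'0' characters.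
--     def find_110(u):
--         for j in range(len(u) - 2):
--             if u[j:j+3] == '110':
--                 return j
--         return -1
--
--     def remove_110(t):
--         u = t
--         j = find_110(u)
--         while j != -1:
--             u = u[:j] + u[j+3:]
--             j = find_110(u)
--         k = (len(t) - len(u)) // 3
--         i = len(u)
--         while i > 0 and u[i-1] != '0':
--             i -= 1
--         return u[:i] + '110' * k + '1' * (len(u) - i)
--
--     return [remove_110(x) for x in s]
-- ===== Notes on version B (the rewrite author's own statement) =====
-- stated objective: alternative
-- what changed: B abandons A's stack machine entirely: it treats the task as string rewriting, repeatedly splicing out the leftmost '110' occurrence until none remains (the rewrite system has no overlaps, so this reaches the same normal form as A's stack), recovers the removal count from the length difference, and reinserts '110'*count before the trailing run of non-'0' characters.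
import Mathlib
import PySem

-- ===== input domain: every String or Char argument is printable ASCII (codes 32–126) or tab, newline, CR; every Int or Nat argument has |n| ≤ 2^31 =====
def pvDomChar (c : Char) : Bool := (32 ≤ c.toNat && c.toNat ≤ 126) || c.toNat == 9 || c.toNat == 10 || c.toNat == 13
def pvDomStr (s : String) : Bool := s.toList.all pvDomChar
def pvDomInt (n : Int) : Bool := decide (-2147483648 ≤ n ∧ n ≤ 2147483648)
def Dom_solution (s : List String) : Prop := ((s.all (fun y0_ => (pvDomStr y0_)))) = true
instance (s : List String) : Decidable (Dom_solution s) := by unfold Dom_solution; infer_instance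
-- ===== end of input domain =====

-- B replaces A's stack elimination by textual rewriting: repeatedly splice out
-- the leftmost "110" occurrence until none remains, recover the count from the
-- length difference, and reinsert before the trailing run of non-'0' chars.


-- ===== PORT A =====
-- Stack held with its TOP at the head (push = cons, pop = tail); A's 'stack' in
-- Python order is 'st.reverse'.  One step of A's first for-loop:
-- 'len(stack) >= 2 and stack[-1] == '1' and stack[-2] == '1' and char == '0''
-- is the head-pattern test below.
def aStep (st : List Char × Int) (c : Char) : List Char × Int :=
  match st.1 with
  | a :: b :: rest =>
      if a = '1' ∧ b = '1' ∧ c = '0' then (rest, st.2 + 1) else (c :: st.1, st.2)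
  | _ => (c :: st.1, st.2)

-- A's second loop: 'for char in stack[::-1]: if char == '0': break else count_1 += 1'.
-- With top-at-head storage, stack[::-1] is the stored list itself.
def aCount1 : List Char → Nat
  | [] => 0
  | c :: rest => if c = '0' then 0 else 1 + aCount1 rest

-- '110' * count_110 as a character list (count_110 ≥ 0 throughout A)
def aRep110 : Nat → List Char
  | 0 => []
  | n + 1 => '1' :: '1' :: '0' :: aRep110 n

-- remove_110: first loop (foldl), second loop, then the final string.
-- stack[:len(stack) - count_1] with 0 ≤ count_1 ≤ len(stack) is 'take (len - count_1)';
-- ''.join / '+' of the three ASCII pieces is String.mk of the concatenated char lists.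
def aRemove110 (string : String) : String :=
  let p := string.toList.foldl aStep ([], 0)
  let stack := p.1.reverse
  let count1 := aCount1 p.1
  String.mk (stack.take (stack.length - count1) ++ aRep110 p.2.toNat ++ List.replicate count1 '1')

-- answer = []; for string in s: answer.append(remove_110(string))
def solution : List String → List String
  | [] => []
  | x :: r => aRemove110 x :: solution r

-- ===== PORT B =====
-- find_110: 'for j in range(len(u)-2): if u[j:j+3] == '110': return j; return -1',
-- as a scan carrying the running index j; the slice test 'u[j:j+3] == "110"' is
-- 'take 3 of the remaining suffix = ['1','1','0']' (windows of fewer than 3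
-- chars never equal '110' in Python either, so scanning to the very end is exact).
-- Result Option Nat: some j = found at j, none = -1.
def bFindAux : List Char → Nat → Option Nat
  | [], _ => none
  | c :: rest, j =>
      if (c :: rest).take 3 = ['1', '1', '0'] then some j else bFindAux rest (j + 1)

-- needed by the termination argument of bRemoveAll (cited in decreasing_by)
theorem bFindAux_some_spec (u : List Char) (j0 k : Nat) (h : bFindAux u j0 = some k) :
    j0 ≤ k ∧ k - j0 + 3 ≤ u.length ∧
      u = u.take (k - j0) ++ '1' :: '1' :: '0' :: u.drop (k - j0 + 3) := by
  induction u generalizing j0 with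
  | nil => simp [bFindAux] at h
  | cons c rest ih =>
      rw [bFindAux] at h
      split at h
      · rename_i ht
        cases h
        have h3 : c :: rest = ['1','1','0'] ++ (c :: rest).drop 3 := by
          conv_lhs => rw [← List.take_append_drop 3 (c :: rest)]
          rw [ht]
        refine ⟨Nat.le_refl _, ?_, ?_⟩
        · have := congrArg List.length ht
          simp at this ⊢; omega
        · simpa using h3
      · obtain ⟨h1, h2, h3⟩ := ih (j0 + 1) h
        have hk : k - j0 = (k - (j0 + 1)) + 1 := by omega
        refine ⟨by omega, by simp; omega, ?_⟩
        rw [hk]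
        simpa using congrArg (c :: ·) h3

-- the while loop: 'while j != -1: u = u[:j] + u[j+3:]; j = find_110(u)'
def bRemoveAll (u : List Char) : List Char :=
  match h : bFindAux u 0 with
  | some j => bRemoveAll (u.take j ++ u.drop (j + 3))
  | none => u
termination_by u.length
decreasing_by
  have := bFindAux_some_spec u 0 j h
  have hl := congrArg List.length this.2.2
  simp at hl ⊢
  omega

-- the final while loop 'i = len(u); while i > 0 and u[i-1] != '0': i -= 1'
-- counts the trailing run of non-'0' chars; counted here over the reversed list.
def bTrail : List Char → Nat
  | [] => 0
  | c :: rest => if c = '0' then 0 else 1 + bTrail rest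

def bRep110 : Nat → List Char
  | 0 => []
  | n + 1 => '1' :: '1' :: '0' :: bRep110 n

def bRemove110 (t : String) : String :=
  let u := bRemoveAll t.toList
  let k := PySem.Int.floordiv ((t.toList.length : Int) - (u.length : Int)) 3
  let i := u.length - bTrail u.reverse
  String.mk (u.take i ++ bRep110 k.toNat ++ List.replicate (u.length - i) '1')

def solution_alt (s : List String) : List String := s.map bRemove110

-- ===== PRECONDITION & SPEC =====
def Spec_solution (s : List String) (out : List String) : Prop := out = solution_alt s
instance (s : List String) (out : List String) : Decidable (Spec_solution s out) := by unfold Spec_solution; infer_instance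

-- ===== CLAIM (what is proved, stated in full; the proofs are below) =====
def Claim_equal_solution : Prop := ∀ (s : List String), Dom_solution s → Spec_solution s (solution s)

-- ===== LEMMAS AND PROOFS =====

-- the count component of A's fold is a pure accumulator
theorem foldA_shift (y : List Char) (st : List Char) (c d : Int) :
    y.foldl aStep (st, c + d) = ((y.foldl aStep (st, c)).1, (y.foldl aStep (st, c)).2 + d) := by
  induction y generalizing st c with
  | nil => rfl
  | cons ch rest ih =>
      have hstep : aStep (st, c + d) ch = ((aStep (st, c) ch).1, (aStep (st, c) ch).2 + d) := by
        rcases st with _ | ⟨a, _ | ⟨b, r⟩⟩ <;> simp [aStep] <;> split_ifs <;> simp <;> ring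
      simp only [List.foldl_cons, hstep]
      have := ih (aStep (st, c) ch).1 (aStep (st, c) ch).2
      simpa using this

-- consuming a literal "110" from any state pops back to the same stack, count + 1
theorem foldA_tri (y : List Char) (st : List Char) (c : Int) :
    ('1' :: '1' :: '0' :: y).foldl aStep (st, c) = y.foldl aStep (st, c + 1) := by
  have h1 : aStep (st, c) '1' = ('1' :: st, c) := by
    rcases st with _ | ⟨a, _ | ⟨b, r⟩⟩ <;> simp [aStep]
  have h2 : aStep ('1' :: st, c) '1' = ('1' :: '1' :: st, c) := by
    rcases st with _ | ⟨a, r⟩ <;> simp [aStep]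
  have h3 : aStep ('1' :: '1' :: st, c) '0' = (st, c + 1) := by
    simp [aStep]
  simp only [List.foldl_cons, h1, h2, h3]

-- no occurrence of "110" across stack.reverse ++ u ⇒ the fold only pushes
theorem foldA_noOcc (u : List Char) (st : List Char) (c : Int)
    (h : ∀ x y, st.reverse ++ u ≠ x ++ '1' :: '1' :: '0' :: y) :
    u.foldl aStep (st, c) = (u.reverse ++ st, c) := by
  induction u generalizing st with
  | nil => simp
  | cons ch rest ih =>
      have hstep : aStep (st, c) ch = (ch :: st, c) := by
        rcases st with _ | ⟨a, _ | ⟨b, r⟩⟩ <;> simp [aStep]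
        intro ha hb h0
        exfalso
        apply h (r.reverse) rest
        subst ha hb h0
        simp
      simp only [List.foldl_cons, hstep]
      rw [ih (ch :: st) (by intro x y hxy; exact h x y (by simpa using hxy))]
      simp

theorem bFindAux_none_noOcc (u : List Char) (j0 : Nat) (h : bFindAux u j0 = none) :
    ∀ x y, u ≠ x ++ '1' :: '1' :: '0' :: y := by
  induction u generalizing j0 with
  | nil => intro x y hxy; exact absurd (congrArg List.length hxy) (by simp)
  | cons c rest ih =>
      rw [bFindAux] at h
      split at h
      · exact absurd h (by simp)
      · rename_i ht
        intro x y hxy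
        match x with
        | [] =>
            apply ht
            rw [hxy]; rfl
        | c' :: x' =>
            cases hxy
            exact ih (j0 + 1) h x' y rfl

-- equations of bRemoveAll's while loop
theorem bRemoveAll_none (u : List Char) (hf : bFindAux u 0 = none) : bRemoveAll u = u := by
  rw [bRemoveAll]
  split
  · rename_i j h'; rw [hf] at h'; cases h'
  · rfl

theorem bRemoveAll_some (u : List Char) (j : Nat) (hf : bFindAux u 0 = some j) :
    bRemoveAll u = bRemoveAll (u.take j ++ u.drop (j + 3)) := by
  rw [bRemoveAll]
  split
  · rename_i j' h'; rw [hf] at h'; cases h'; rfl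
  · rename_i h'; rw [hf] at h'; cases h'

-- the heart: A's fold computes bRemoveAll's normal form and the deletion count
theorem foldA_eq_removeAll (u : List Char) :
    ∃ n : Nat, u.foldl aStep ([], 0) = ((bRemoveAll u).reverse, (n : Int)) ∧
      u.length = (bRemoveAll u).length + 3 * n := by
  induction hu : u.length using Nat.strong_induction_on generalizing u with
  | _ L ih =>
    subst hu
    cases hf : bFindAux u 0 with
    | none =>
        rw [bRemoveAll_none u hf]
        refine ⟨0, ?_, by omega⟩
        have := foldA_noOcc u [] 0 (by simpa using bFindAux_none_noOcc u 0 hf)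
        simpa using this
    | some j =>
        obtain ⟨-, hlen, hdec⟩ := bFindAux_some_spec u 0 j hf
        simp only [Nat.sub_zero] at hlen hdec
        rw [bRemoveAll_some u j hf]
        set x := u.take j with hx
        set y := u.drop (j + 3) with hy
        have hulen : u.length = (x ++ y).length + 3 := by
          have := congrArg List.length hdec; simp at this ⊢; omega
        obtain ⟨n, hfold, hcnt⟩ := ih (x ++ y).length (by omega) (x ++ y) rfl
        refine ⟨n + 1, ?_, by omega⟩
        conv_lhs => rw [hdec]
        rw [List.foldl_append, foldA_tri]
        rw [foldA_shift y (x.foldl aStep (([] : List Char), (0:Int))).1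
              (x.foldl aStep (([] : List Char), (0:Int))).2 1]
        rw [show ((x.foldl aStep (([] : List Char), (0:Int))).1,
              (x.foldl aStep (([] : List Char), (0:Int))).2)
            = x.foldl aStep (([] : List Char), (0:Int)) from rfl]
        rw [← List.foldl_append, hfold]
        simp

theorem trail_eq_count1 (l : List Char) : bTrail l = aCount1 l := by
  induction l with
  | nil => rfl
  | cons c rest ih => simp [bTrail, aCount1, ih]

theorem count1_le_length (l : List Char) : aCount1 l ≤ l.length := by
  induction l with
  | nil => simp [aCount1]
  | cons c rest ih => simp [aCount1]; split_ifs <;> omega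

theorem rep110_eq (n : Nat) : bRep110 n = aRep110 n := by
  induction n with
  | zero => rfl
  | succ n ih => simp [bRep110, aRep110, ih]

theorem remove_eq (t : String) : aRemove110 t = bRemove110 t := by
  obtain ⟨n, hfold, hlen⟩ := foldA_eq_removeAll t.toList
  have hk : PySem.Int.floordiv ((t.toList.length : Int) - ((bRemoveAll t.toList).length : Int)) 3
      = (n : Int) := by
    have hd : (t.toList.length : Int) - ((bRemoveAll t.toList).length : Int) = 3 * n := by
      rw [hlen]; push_cast; ring
    rw [hd, PySem.Int.floordiv_eq_ediv_of_pos (by norm_num)]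
    omega
  have hc : aCount1 (bRemoveAll t.toList).reverse ≤ (bRemoveAll t.toList).length := by
    simpa using count1_le_length (bRemoveAll t.toList).reverse
  simp only [aRemove110, bRemove110, hfold, hk, List.reverse_reverse, Int.toNat_natCast,
    rep110_eq, trail_eq_count1]
  rw [Nat.sub_sub_self hc]

theorem solution_eq (s : List String) : solution s = solution_alt s := by
  induction s with
  | nil => rfl
  | cons x r ih => simp [solution, solution_alt, remove_eq] at ih ⊢; exact ih

-- ===== VERDICT (by name: the statement is the Claim_ definition above) =====
theorem solution_spec : Claim_equal_solution := by
  intro s _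
  unfold Spec_solution
  exact solution_eq s
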